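-- pv_equiv track=rewrite | github.com/destifo/Competitive-Programming | 2439. Minimize Maximum of Array/MinimizeArrayValue.py | validMaximum
-- ===== SOURCE A (Python) =====
-- from typing import List
--
-- def validMaximum(nums: List[int], maxm: int) -> bool:
--     remaining = 0
--
--     for i in range(len(nums)-1, 0, -1):
--         if nums[i] <= maxm:
--             remaining = max(0, remaining-(maxm-nums[i]))
--             continue
--
--         remaining += (nums[i]-maxm)
--
--     return nums[0] + remaining <= maxm
-- ===== SOURCE B (Python) =====
-- def validMaximum(nums, maxm):
--     prefix = 0
--     for i, x in enumerate(nums):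
--         prefix += x
--         if prefix > maxm * (i + 1):
--             return False
--     return True
-- ===== Notes on version B (the rewrite author's own statement) =====
-- stated objective: simpler
-- what changed: B replaces A's backward overflow accumulator (right-to-left pass pushing excess over maxm leftward with a clamped 'remaining') by a single left-to-right prefix-sum sweep that returns False as soon as some prefix sum exceeds maxm*(i+1).
import Mathlib
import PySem

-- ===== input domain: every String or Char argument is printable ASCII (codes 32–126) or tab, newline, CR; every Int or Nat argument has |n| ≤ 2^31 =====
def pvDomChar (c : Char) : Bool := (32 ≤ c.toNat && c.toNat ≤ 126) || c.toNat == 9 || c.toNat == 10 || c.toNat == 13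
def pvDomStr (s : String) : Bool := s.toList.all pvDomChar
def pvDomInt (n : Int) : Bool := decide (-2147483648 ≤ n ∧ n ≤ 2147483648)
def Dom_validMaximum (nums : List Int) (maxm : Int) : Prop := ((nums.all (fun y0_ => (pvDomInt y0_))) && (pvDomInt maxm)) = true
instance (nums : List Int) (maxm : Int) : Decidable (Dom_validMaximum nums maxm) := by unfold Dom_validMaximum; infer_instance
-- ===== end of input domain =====

-- B replaces A's right-to-left clamped overflow accumulator by a left-to-right prefix-sum
-- sweep (prefix_sum > maxm*(i+1) ⇒ False); equal return values on every non-empty list.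

-- ===== PORT A =====
def validMaximum (nums : List Int) (maxm : Int) : Bool :=
  let remaining :=
    (PySem.List.pyRange ((nums.length : Int) - 1) 0 (-1)).foldl
      (fun remaining i =>
        if PySem.List.pyGetD nums i 0 ≤ maxm then
          max 0 (remaining - (maxm - PySem.List.pyGetD nums i 0))
        else
          remaining + (PySem.List.pyGetD nums i 0 - maxm)) 0
  decide (PySem.List.pyGetD nums 0 0 + remaining ≤ maxm)

-- ===== PORT B =====
-- Source B's loop 'for i, x in enumerate(nums)' with an early return, as structural recursion
def altLoop (maxm : Int) : List Int → Int → Int → Bool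
  | [], _, _ => true
  | x :: rest, i, pre =>
    let p := pre + x
    if p > maxm * (i + 1) then false else altLoop maxm rest (i + 1) p

def validMaximum_alt (nums : List Int) (maxm : Int) : Bool :=
  altLoop maxm nums 0 0

-- ===== PRECONDITION & SPEC =====
-- Pre_ excludes exactly the empty list, on which A raises IndexError (nums[0]).
def Pre_validMaximum (nums : List Int) (maxm : Int) : Prop := nums ≠ []
instance (nums : List Int) (maxm : Int) : Decidable (Pre_validMaximum nums maxm) := by unfold Pre_validMaximum; infer_instance
def pvWitness_validMaximum : List Int × Int := ([3, 7, 1], 5)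

def Spec_validMaximum (nums : List Int) (maxm : Int) (out : Bool) : Prop := out = validMaximum_alt nums maxm
instance (nums : List Int) (maxm : Int) (out : Bool) : Decidable (Spec_validMaximum nums maxm out) := by unfold Spec_validMaximum; infer_instance

-- ===== CLAIM (what is proved, stated in full; the proofs are below) =====
def Claim_equal_validMaximum : Prop := ∀ (nums : List Int) (maxm : Int), Dom_validMaximum nums maxm → Pre_validMaximum nums maxm → Spec_validMaximum nums maxm (validMaximum nums maxm)

-- ===== LEMMAS AND PROOFS =====

-- A's loop body as a foldr step over the tail elements
def stepA (maxm a r : Int) : Int :=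
  if a ≤ maxm then max 0 (r - (maxm - a)) else r + (a - maxm)

def FA (maxm : Int) (t : List Int) : Int := t.foldr (stepA maxm) 0

lemma FA_nonneg (maxm : Int) (t : List Int) : 0 ≤ FA maxm t := by
  induction t with
  | nil => simp [FA]
  | cons a rest ih =>
    simp only [FA, List.foldr_cons, stepA] at *
    split_ifs with h <;> omega

-- A's pyRange/pyGetD fold on x :: t is the foldr of stepA over t
lemma foldA_eq (x : Int) (t : List Int) (maxm : Int) :
    validMaximum (x :: t) maxm = decide (x + FA maxm t ≤ maxm) := by
  unfold validMaximum
  have h1 : ((((x :: t).length : Int) - 1)) = (t.length : Int) := by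
    push_cast [List.length_cons]; ring
  rw [h1, PySem.List.pyRange_neg_one_eq_reverse, List.foldl_reverse]
  have h2 : ((0 : Int) + 1) = 1 := by norm_num
  have h3 : ((t.length : Int) + 1) = ((x :: t).length : Int) := by push_cast [List.length_cons]; ring
  rw [h2, h3]
  have h4 : (PySem.List.pyRange 1 ((x :: t).length : Int) 1).foldr
      (fun i r => if PySem.List.pyGetD (x :: t) i 0 ≤ maxm then
          max 0 (r - (maxm - PySem.List.pyGetD (x :: t) i 0))
        else r + (PySem.List.pyGetD (x :: t) i 0 - maxm)) 0
      = ((PySem.List.pyRange 1 ((x :: t).length : Int) 1).map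
          (fun i => PySem.List.pyGetD (x :: t) i 0)).foldr (stepA maxm) 0 := by
    rw [List.foldr_map]
    rfl
  have h5 : (PySem.List.pyRange 1 ((x :: t).length : Int) 1).map
      (fun i => PySem.List.pyGetD (x :: t) i 0) = t := by
    rw [PySem.List.map_pyGetD_pyRange' (x :: t) 0 (by norm_num)]
    rfl
  simp only [h4, h5, FA, PySem.List.pyGetD_zero_cons]
  rfl

-- B's loop depends on (pre - maxm*i) only; for a nonpositive value it decides d + FA ≤ 0
lemma altLoop_eq (maxm : Int) : ∀ (t : List Int) (i c : Int),
    c - maxm * i ≤ 0 →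
    altLoop maxm t i c = decide ((c - maxm * i) + FA maxm t ≤ 0) := by
  intro t
  induction t with
  | nil =>
    intro i c h
    have h0 : FA maxm ([] : List Int) = 0 := rfl
    show true = decide ((c - maxm * i) + FA maxm [] ≤ 0)
    rw [h0]
    symm
    rw [decide_eq_true_iff]
    omega
  | cons x rest ih =>
    intro i c h
    have hmul : maxm * (i + 1) = maxm * i + maxm := by ring
    have hF : 0 ≤ FA maxm rest := FA_nonneg maxm rest
    have hFc : FA maxm (x :: rest) = stepA maxm x (FA maxm rest) := rfl
    simp only [altLoop, hmul, hFc, stepA]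
    by_cases hc : c + x > maxm * i + maxm
    · rw [if_pos hc]
      split_ifs with hx <;>
        · symm; rw [decide_eq_false_iff_not]; omega
    · rw [if_neg hc, ih (i + 1) (c + x) (by rw [hmul]; omega)]
      rw [hmul]
      have harg : c + x - (maxm * i + maxm) = (c - maxm * i) + x - maxm := by ring
      split_ifs with hx <;>
        · rw [decide_eq_decide]; omega

theorem validMaximum_spec : Claim_equal_validMaximum := by
  intro nums maxm _ hpre
  unfold Spec_validMaximum
  cases nums with
  | nil => exact absurd rfl hpre
  | cons x t =>
    rw [foldA_eq]
    unfold validMaximum_alt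
    have hF : 0 ≤ FA maxm t := FA_nonneg maxm t
    rw [altLoop_eq maxm (x :: t) 0 0 (by simp)]
    have hFc : FA maxm (x :: t) = stepA maxm x (FA maxm t) := rfl
    have hz : (0 : Int) - maxm * 0 = 0 := by ring
    rw [hFc, hz, decide_eq_decide]
    unfold stepA
    split_ifs with hx <;> omega
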